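-- pv_equiv track=rewrite | github.com/tmwnd/aoc_2021 | 25/cucumber.py | move_v
-- ===== SOURCE A (Python) =====
-- def move_v(data, index):
--     ret = False
--     i = 0
--     while i < len(data):
--         if data[i][index] == 'v' and data[i+1 if i+1<len(data) else 0][index] == '.':
--             data[i][index] = '.' if i != 0 else 'x'
--             data[i+1 if i+1<len(data) else 0][index] = 'v'
--             i += 1
--             ret = True
--         i += 1
--     if data[0][index] == 'x':
--         data[0][index] = '.'
--     return ret
-- ===== SOURCE B (Python) =====
-- def move_v(data, index):
--     # Simultaneous update from a snapshot of the column; return value only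
--     # (mutation differs from A in one corner: A also rewrites a pre-existing
--     # 'x' at data[0][index] to '.', B never does).
--     n = len(data)
--     orig = [row[index] for row in data]
--     moved = False
--     for r in range(n):
--         if orig[r] == 'v' and orig[(r + 1) % n] == '.':
--             data[r][index] = '.'
--             moved = True
--         elif orig[r] == '.' and orig[(r - 1) % n] == 'v':
--             data[r][index] = 'v'
--     return moved
-- ===== Notes on version B (the rewrite author's own statement) =====
-- stated objective: simpler
-- what changed: Replaces A's sequential in-place sweep (skip-ahead after a move, 'x' sentinel at row 0 and a final cleanup pass) by a simultaneous one-pass update computed from a snapshot of the column, with modular wrap-around.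
import Mathlib
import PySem

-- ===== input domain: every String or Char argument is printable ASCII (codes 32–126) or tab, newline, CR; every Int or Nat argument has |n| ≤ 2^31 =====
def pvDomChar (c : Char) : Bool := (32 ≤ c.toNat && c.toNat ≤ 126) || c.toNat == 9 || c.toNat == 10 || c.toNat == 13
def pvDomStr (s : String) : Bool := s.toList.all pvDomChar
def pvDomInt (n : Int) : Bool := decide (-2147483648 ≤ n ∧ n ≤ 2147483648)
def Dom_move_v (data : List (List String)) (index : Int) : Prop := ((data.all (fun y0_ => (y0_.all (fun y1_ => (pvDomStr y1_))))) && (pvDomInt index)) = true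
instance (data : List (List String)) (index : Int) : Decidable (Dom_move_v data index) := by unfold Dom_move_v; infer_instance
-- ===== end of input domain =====

-- B does a simultaneous one-pass update from a snapshot of the column instead of A's
-- in-place sequential sweep with its 'x' sentinel; equivalence proved is about the RETURN
-- value only (both mutate `data` the same way on '.'/'v' cells, but A additionally turns a
-- pre-existing 'x' at data[0][index] into '.').

-- ===== PORT A =====
-- data[r][index] as Python reads it (used only at rows r < data.length with index in range)
def pvCell (data : List (List String)) (r : Nat) (index : Int) : String :=
  PySem.List.pyGetD (data.getD r []) index ""
-- data[r][index] = v
def pvSetCell (data : List (List String)) (r : Nat) (index : Int) (v : String) : List (List String) :=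
  data.set r (PySem.List.pySetD (data.getD r []) index v)

-- the while loop; n = len(data) (constant: the writes preserve the shape); fuel ≥ n - i suffices
def moveVLoop (index : Int) (n : Nat) : Nat → List (List String) → Nat → Bool → (List (List String) × Bool)
  | 0, data, _, ret => (data, ret)
  | fuel+1, data, i, ret =>
    if i < n then
      let j := if i + 1 < n then i + 1 else 0
      if pvCell data i index == "v" && pvCell data j index == "." then
        let d1 := pvSetCell data i index (if i ≠ 0 then "." else "x")
        let d2 := pvSetCell d1 j index "v"
        moveVLoop index n fuel d2 (i + 2) true
      else
        moveVLoop index n fuel data (i + 1) ret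
    else (data, ret)

def move_v (data : List (List String)) (index : Int) : Bool :=
  let st := moveVLoop index data.length (data.length + 1) data 0 false
  -- final `if data[0][index] == 'x': data[0][index] = '.'` only mutates, never changes ret
  let _ := if pvCell st.1 0 index == "x" then pvSetCell st.1 0 index "." else st.1
  st.2

-- ===== PORT B =====
def move_v_alt (data : List (List String)) (index : Int) : Bool :=
  let n := data.length
  let orig := data.map (fun row => PySem.List.pyGetD row index "")
  ((List.range n).foldl (fun (st : List (List String) × Bool) r =>
      if orig.getD r "" == "v" && orig.getD ((r + 1) % n) "" == "." then
        (pvSetCell st.1 r index ".", true)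
      else if orig.getD r "" == "." && orig.getD ((r + n - 1) % n) "" == "v" then
        (pvSetCell st.1 r index "v", st.2)
      else st) (data, false)).2

-- ===== PRECONDITION & SPEC =====
-- A raises IndexError iff data is empty or `index` is out of range for some row; exactly those are excluded.
def Pre_move_v (data : List (List String)) (index : Int) : Prop :=
  data ≠ [] ∧ ∀ row ∈ data, PySem.Raise.InRange row.length index
instance (data : List (List String)) (index : Int) : Decidable (Pre_move_v data index) := by
  unfold Pre_move_v; infer_instance
def pvWitness_move_v : List (List String) × Int := ([["v"], ["."]], 0)

def Spec_move_v (data : List (List String)) (index : Int) (out : Bool) : Prop := out = move_v_alt data index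
instance (data : List (List String)) (index : Int) (out : Bool) : Decidable (Spec_move_v data index out) := by
  unfold Spec_move_v; infer_instance

-- ===== CLAIM (what is proved, stated in full; the proofs are below) =====
def Claim_equal_move_v : Prop := ∀ (data : List (List String)) (index : Int), Dom_move_v data index → Pre_move_v data index → Spec_move_v data index (move_v data index)

-- ===== LEMMAS AND PROOFS =====

-- "a south cucumber moves at row r", read off the ORIGINAL data
def pvMovesB (data : List (List String)) (index : Int) (r : Nat) : Bool :=
  (pvCell data r index == "v") && (pvCell data (if r + 1 < data.length then r + 1 else 0) index == ".")

theorem pvIdx_some (n : Nat) (i : Int) (h : PySem.Raise.InRange n i) :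
    ∃ k, PySem.List.pyIdx? n i = some k ∧ k < n := by
  obtain ⟨h1, h2⟩ := h
  by_cases h0 : 0 ≤ i
  · exact ⟨i.toNat, by simp [PySem.List.pyIdx?, h0, h2], by omega⟩
  · exact ⟨n - (-i).toNat, by simp [PySem.List.pyIdx?, h0, h1], by omega⟩

theorem pyGetD_pySetD_self (xs : List String) (i : Int) (v d : String)
    (h : PySem.Raise.InRange xs.length i) :
    PySem.List.pyGetD (PySem.List.pySetD xs i v) i d = v := by
  obtain ⟨k, hk, hkn⟩ := pvIdx_some xs.length i h
  simp [PySem.List.pySetD, PySem.List.pySet?, PySem.List.pyGetD, PySem.List.pyGet?,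
        List.length_set, hk, hkn]

theorem pvSetCell_length (d : List (List String)) (r : Nat) (index : Int) (v : String) :
    (pvSetCell d r index v).length = d.length := by
  simp [pvSetCell]

theorem pvRowLen_set (d : List (List String)) (r r' : Nat) (index : Int) (v : String) :
    ((pvSetCell d r index v).getD r' []).length = (d.getD r' []).length := by
  simp only [pvSetCell, List.getD_eq_getElem?_getD, List.getElem?_set]
  split_ifs with h1 h2
  · subst h1; simp [List.getElem?_eq_getElem h2, PySem.List.length_pySetD]
  · subst h1; simp [List.getElem?_eq_none (show d.length ≤ r by omega)]
  · rfl

theorem pvCell_set_ne (d : List (List String)) (r r' : Nat) (index : Int) (v : String)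
    (hne : r' ≠ r) :
    pvCell (pvSetCell d r index v) r' index = pvCell d r' index := by
  simp [pvCell, pvSetCell, List.getD_eq_getElem?_getD, Ne.symm hne]

theorem pvCell_set_self (d : List (List String)) (r : Nat) (index : Int) (v : String)
    (hr : r < d.length) (hin : PySem.Raise.InRange (d.getD r []).length index) :
    pvCell (pvSetCell d r index v) r index = v := by
  simp only [pvCell, pvSetCell, List.getD_eq_getElem?_getD, List.getElem?_set_self hr,
    Option.getD_some]
  rw [List.getD_eq_getElem?_getD] at hin
  exact pyGetD_pySetD_self _ _ _ _ hin

-- in-range transfer to a row of the original data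
theorem pvRowIn (data : List (List String)) (index : Int)
    (hpre : ∀ row ∈ data, PySem.Raise.InRange row.length index) (r : Nat)
    (hr : r < data.length) : PySem.Raise.InRange ((data.getD r []).length) index := by
  apply hpre
  rw [List.getD_eq_getElem?_getD, List.getElem?_eq_getElem hr]
  exact List.getElem_mem hr

-- ========== A-side: the while-loop invariant ==========
theorem loopA_inv (data : List (List String)) (index : Int)
    (hpre : ∀ row ∈ data, PySem.Raise.InRange row.length index) :
    ∀ (fuel : Nat) (d : List (List String)) (i : Nat) (ret : Bool),
    data.length ≤ i + fuel →
    d.length = data.length →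
    (∀ r, (d.getD r []).length = (data.getD r []).length) →
    (∀ r, i ≤ r → r < data.length → pvCell d r index = pvCell data r index) →
    (0 < i → i < data.length →
      pvCell d 0 index = (if pvMovesB data index 0 then "x" else pvCell data 0 index)) →
    (i = 0 → d = data) →
    ret = decide (∃ r, r < i ∧ r < data.length ∧ pvMovesB data index r = true) →
    (moveVLoop index data.length fuel d i ret).2
      = decide (∃ r, r < data.length ∧ pvMovesB data index r = true) := by
  intro fuel
  induction fuel with
  | zero =>
    intro d i ret hfuel hlen hrow hcell h0 hi0 hret
    simp only [moveVLoop]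
    rw [hret]
    apply decide_eq_decide.mpr
    constructor
    · rintro ⟨r, _, hr2, hr3⟩; exact ⟨r, hr2, hr3⟩
    · rintro ⟨r, hr2, hr3⟩; exact ⟨r, by omega, hr2, hr3⟩
  | succ fuel ih =>
    intro d i ret hfuel hlen hrow hcell h0 hi0 hret
    simp only [moveVLoop]
    by_cases hin : i < data.length
    · simp only [if_pos hin]
      -- the branch condition read from the current d equals the move predicate on the original data
      have hcond : (pvCell d i index == "v" &&
          pvCell d (if i + 1 < data.length then i + 1 else 0) index == ".")
          = pvMovesB data index i := by
        rw [pvMovesB, hcell i le_rfl hin]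
        by_cases hj : i + 1 < data.length
        · rw [if_pos hj, hcell (i+1) (by omega) hj]
        · rw [if_neg hj]
          rcases Nat.eq_zero_or_pos i with hz | hp
          · subst hz; rw [hi0 rfl]
          · rw [h0 hp hin]
            by_cases hm : pvMovesB data index 0 = true
            · rw [if_pos hm]
              have hv : pvCell data 0 index = "v" := by
                have h' := hm
                rw [pvMovesB, Bool.and_eq_true, beq_iff_eq] at h'
                exact h'.1
              rw [hv]
              simp
            · rw [if_neg hm]
      rw [hcond]
      by_cases hmv : pvMovesB data index i = true
      · rw [if_pos hmv]
        apply ih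
        · omega
        · rw [pvSetCell_length, pvSetCell_length, hlen]
        · intro r; rw [pvRowLen_set, pvRowLen_set]; exact hrow r
        · intro r hr1 hr2
          rw [pvCell_set_ne _ _ _ _ _ (by split_ifs <;> omega),
              pvCell_set_ne _ _ _ _ _ (by omega)]
          exact hcell r (by omega) hr2
        · intro _ hlt2
          have hj : (if i + 1 < data.length then i + 1 else 0) = i + 1 := if_pos (by omega)
          rw [hj]
          rcases Nat.eq_zero_or_pos i with hz | hp
          · subst hz
            rw [hi0 rfl]
            rw [pvCell_set_ne _ _ _ _ _ (by omega)]
            rw [show (if (0:Nat) ≠ 0 then "." else "x") = "x" from rfl]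
            rw [pvCell_set_self data 0 index "x" (by omega)
                  (pvRowIn data index hpre 0 (by omega))]
            rw [if_pos hmv]
          · rw [pvCell_set_ne _ _ _ _ _ (by omega), pvCell_set_ne _ _ _ _ _ (by omega)]
            exact h0 hp (by omega)
        · intro h; exact absurd h (by omega)
        · symm; rw [decide_eq_true_eq]
          exact ⟨i, by omega, hin, hmv⟩
      · rw [if_neg hmv]
        apply ih
        · omega
        · exact hlen
        · exact hrow
        · intro r hr1 hr2; exact hcell r (by omega) hr2
        · intro _ _
          rcases Nat.eq_zero_or_pos i with hz | hp
          · subst hz; rw [hi0 rfl, if_neg hmv]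
          · exact h0 hp (by omega)
        · intro h; exact absurd h (by omega)
        · rw [hret]
          apply decide_eq_decide.mpr
          constructor
          · rintro ⟨r, hr1, hr2, hr3⟩; exact ⟨r, by omega, hr2, hr3⟩
          · rintro ⟨r, hr1, hr2, hr3⟩
            refine ⟨r, ?_, hr2, hr3⟩
            rcases Nat.lt_succ_iff_lt_or_eq.mp hr1 with h | h
            · exact h
            · subst h; exact absurd hr3 hmv
    · simp only [if_neg hin]
      rw [hret]
      apply decide_eq_decide.mpr
      constructor
      · rintro ⟨r, _, hr2, hr3⟩; exact ⟨r, hr2, hr3⟩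
      · rintro ⟨r, hr2, hr3⟩; exact ⟨r, by omega, hr2, hr3⟩

theorem moveA_eq (data : List (List String)) (index : Int)
    (hpre : ∀ row ∈ data, PySem.Raise.InRange row.length index) :
    move_v data index = decide (∃ r, r < data.length ∧ pvMovesB data index r = true) := by
  simp only [move_v]
  apply loopA_inv data index hpre
  · omega
  · rfl
  · intro r; rfl
  · intro r _ _; rfl
  · intro h; omega
  · intro _; rfl
  · symm; rw [decide_eq_false_iff_not]; rintro ⟨r, hr, _⟩; omega

-- ========== B-side ==========
theorem foldl_pair_snd (index : Int) (n : Nat) (orig : List String) :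
    ∀ (l : List Nat) (d : List (List String)) (b : Bool),
    ((l.foldl (fun (st : List (List String) × Bool) r =>
        if orig.getD r "" == "v" && orig.getD ((r + 1) % n) "" == "." then
          (pvSetCell st.1 r index ".", true)
        else if orig.getD r "" == "." && orig.getD ((r + n - 1) % n) "" == "v" then
          (pvSetCell st.1 r index "v", st.2)
        else st) (d, b)).2)
      = l.foldl (fun b r => b || (orig.getD r "" == "v" && orig.getD ((r + 1) % n) "" == ".")) b := by
  intro l
  induction l with
  | nil => intro d b; rfl
  | cons x xs ih =>
    intro d b
    simp only [List.foldl_cons]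
    by_cases h1 : (orig.getD x "" == "v" && orig.getD ((x + 1) % n) "" == ".") = true
    · simp only [h1, if_true, ih, Bool.or_true]
    · by_cases h2 : (orig.getD x "" == "." && orig.getD ((x + n - 1) % n) "" == "v") = true
      · rw [Bool.not_eq_true] at h1
        simp only [h1, h2, Bool.false_eq_true, if_false, if_true, ih, Bool.or_false]
      · rw [Bool.not_eq_true] at h1; rw [Bool.not_eq_true] at h2
        simp only [h1, h2, Bool.false_eq_true, if_false, ih, Bool.or_false]

theorem foldl_or (c : Nat → Bool) :
    ∀ (l : List Nat) (b : Bool), l.foldl (fun b r => b || c r) b = (b || l.any c) := by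
  intro l
  induction l with
  | nil => intro b; simp
  | cons x xs ih => intro b; simp [ih, Bool.or_assoc]

-- the snapshot cell equals the original cell, and Python's % wrap equals A's conditional wrap
theorem origD_eq (data : List (List String)) (index : Int) (r : Nat) (hr : r < data.length) :
    (data.map (fun row => PySem.List.pyGetD row index "")).getD r "" = pvCell data r index := by
  simp [pvCell, List.getD_eq_getElem?_getD, List.getElem?_map, List.getElem?_eq_getElem hr]

theorem wrap_eq (r n : Nat) (hr : r < n) :
    (r + 1) % n = if r + 1 < n then r + 1 else 0 := by
  split_ifs with h
  · exact Nat.mod_eq_of_lt h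
  · have : r + 1 = n := by omega
    simp [this]

theorem moveB_eq (data : List (List String)) (index : Int) :
    move_v_alt data index = decide (∃ r, r < data.length ∧ pvMovesB data index r = true) := by
  simp only [move_v_alt]
  rw [foldl_pair_snd, foldl_or, Bool.false_or]
  apply Bool.eq_iff_iff.mpr
  rw [List.any_eq_true, decide_eq_true_eq]
  constructor
  · rintro ⟨r, hmem, hc⟩
    have hr : r < data.length := List.mem_range.mp hmem
    refine ⟨r, hr, ?_⟩
    rwa [pvMovesB, ← origD_eq data index r hr, ← wrap_eq r data.length hr,
      ← origD_eq data index ((r + 1) % data.length) (Nat.mod_lt _ (by omega))]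
  · rintro ⟨r, hr, hb⟩
    refine ⟨r, List.mem_range.mpr hr, ?_⟩
    rwa [pvMovesB, ← origD_eq data index r hr, ← wrap_eq r data.length hr,
      ← origD_eq data index ((r + 1) % data.length) (Nat.mod_lt _ (by omega))] at hb

-- ===== VERDICT (by name: the statement is the Claim_ definition above) =====
theorem move_v_spec : Claim_equal_move_v := by
  intro data index _ hpre
  unfold Spec_move_v
  rw [moveA_eq data index hpre.2, moveB_eq]
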